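-- pv_equiv track=rewrite | github.com/TrueNorthIT/AdventOfCode | 2025/day02/day2.py | checkvalidprt2
-- ===== SOURCE A (Python) =====
-- def checkvalidprt2(number):
--     stringnum = str(number)
--     if len(stringnum) % 2 == 0:
--
--         halfwaypoint = int(len(stringnum) / 2)
--         getthrough=0
--         for letternum in range(0, halfwaypoint):
--
--             if (stringnum[letternum] == stringnum[letternum + halfwaypoint]):
--                 getthrough+=1
--                 continue
--             else:
--                 pass
--         if getthrough ==halfwaypoint:
--             return False
--     if len(stringnum)% 3==0:
--         thirdwaypoint = int(len(stringnum) / 3)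
--         getthrough = 0
--         for letternum in range(0, thirdwaypoint):
--             if (stringnum[letternum] == stringnum[letternum + thirdwaypoint]==stringnum[letternum+2*thirdwaypoint]):
--                 getthrough += 1
--                 continue
--             else:
--                 pass
--         if getthrough == thirdwaypoint:
--             return False
--     if len(stringnum)% 5==0:
--         fifthwaypoint = int(len(stringnum) / 5)
--         getthrough = 0
--         for letternum in range(0, fifthwaypoint):
--             if (stringnum[letternum] == stringnum[letternum + fifthwaypoint]==stringnum[letternum+2*fifthwaypoint]==stringnum[letternum+3*fifthwaypoint]==stringnum[letternum+4*fifthwaypoint]):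
--                 getthrough += 1
--                 continue
--             else:
--                 pass
--         if getthrough == fifthwaypoint:
--             return False
--     if len(stringnum)% 7==0:
--         seventhwaypoint = int(len(stringnum) / 7)
--         getthrough = 0
--         for letternum in range(0, seventhwaypoint):
--             if (stringnum[letternum] == stringnum[letternum + seventhwaypoint]==stringnum[letternum+2*seventhwaypoint]==stringnum[letternum+3*seventhwaypoint]==stringnum[letternum+4*seventhwaypoint]==stringnum[letternum+5*seventhwaypoint]==stringnum[letternum+6*seventhwaypoint]):
--                 getthrough += 1
--                 continue
--             else:
--                 pass
--         if getthrough == seventhwaypoint: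
--             return False
--     return True
-- ===== SOURCE B (Python) =====
-- def checkvalidprt2(number):
--     s = str(number)
--     n = len(s)
--     for k in (2, 3, 5, 7):
--         if n % k == 0 and s[:n // k] * k == s:
--             return False
--     return True
-- ===== Notes on version B (the rewrite author's own statement) =====
-- stated objective: simpler
-- what changed: Replaces A's four copy-pasted per-position counting loops (one per divisor, with chained cross-block character comparisons) by a single loop over the divisors (2,3,5,7) that tests block-repetition with one slice-and-repeat string equality.
import Mathlib
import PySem

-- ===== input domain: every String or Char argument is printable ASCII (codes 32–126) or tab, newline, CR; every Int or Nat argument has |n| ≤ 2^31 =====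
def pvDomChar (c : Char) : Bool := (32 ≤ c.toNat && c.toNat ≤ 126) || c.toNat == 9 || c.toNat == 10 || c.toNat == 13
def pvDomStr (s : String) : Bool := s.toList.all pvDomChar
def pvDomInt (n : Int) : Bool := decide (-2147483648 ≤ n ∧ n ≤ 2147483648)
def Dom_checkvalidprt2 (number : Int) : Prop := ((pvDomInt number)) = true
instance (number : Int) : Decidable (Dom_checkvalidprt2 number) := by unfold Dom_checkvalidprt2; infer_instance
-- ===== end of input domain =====

-- B replaces A's four copy-pasted per-divisor counting loops by one loop over (2,3,5,7)
-- testing block-repetition with slice-and-repeat equality; objective: simpler.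

-- ===== PORT A =====
-- A's per-block counting loop: `getthrough` accumulated over range(0, w).
def pvCount (P : Nat → Bool) (w : Nat) : Nat :=
  (List.range w).foldl (fun g i => if P i then g + 1 else g) 0

-- A's body on the digit string (as List Char). All indices reached are in range
-- (i < w and i + j*w < len when len = k*w), so `getD` is exact for Python's s[i].
-- Python's chained `a == b == c` is `(a == b) and (b == c)`, transcribed with &&;
-- int(len/2) = len/2 exactly for these sizes (floats are exact below 2^53).
def pvCheckA (s : List Char) : Bool :=
  if s.length % 2 == 0 && pvCount (fun i => s.getD i ' ' == s.getD (i + s.length / 2) ' ') (s.length / 2) == s.length / 2 then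
    false
  else if s.length % 3 == 0 && pvCount (fun i =>
      (s.getD i ' ' == s.getD (i + s.length / 3) ' ') &&
      (s.getD (i + s.length / 3) ' ' == s.getD (i + 2 * (s.length / 3)) ' ')) (s.length / 3) == s.length / 3 then
    false
  else if s.length % 5 == 0 && pvCount (fun i =>
      (s.getD i ' ' == s.getD (i + s.length / 5) ' ') &&
      (s.getD (i + s.length / 5) ' ' == s.getD (i + 2 * (s.length / 5)) ' ') &&
      (s.getD (i + 2 * (s.length / 5)) ' ' == s.getD (i + 3 * (s.length / 5)) ' ') &&
      (s.getD (i + 3 * (s.length / 5)) ' ' == s.getD (i + 4 * (s.length / 5)) ' ')) (s.length / 5) == s.length / 5 then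
    false
  else if s.length % 7 == 0 && pvCount (fun i =>
      (s.getD i ' ' == s.getD (i + s.length / 7) ' ') &&
      (s.getD (i + s.length / 7) ' ' == s.getD (i + 2 * (s.length / 7)) ' ') &&
      (s.getD (i + 2 * (s.length / 7)) ' ' == s.getD (i + 3 * (s.length / 7)) ' ') &&
      (s.getD (i + 3 * (s.length / 7)) ' ' == s.getD (i + 4 * (s.length / 7)) ' ') &&
      (s.getD (i + 4 * (s.length / 7)) ' ' == s.getD (i + 5 * (s.length / 7)) ' ') &&
      (s.getD (i + 5 * (s.length / 7)) ' ' == s.getD (i + 6 * (s.length / 7)) ' ')) (s.length / 7) == s.length / 7 then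
    false
  else true

def checkvalidprt2 (number : Int) : Bool :=
  pvCheckA (PySem.Int.toStr number).toList

-- ===== PORT B =====
-- B's single loop over the divisor tuple; s[:n//k] * k == s is take/replicate/flatten.
def pvRepCheck (s : List Char) : List Nat → Bool
  | [] => true
  | k :: ks =>
      if s.length % k == 0 && (List.replicate k (s.take (s.length / k))).flatten == s then
        false
      else pvRepCheck s ks

def checkvalidprt2_alt (number : Int) : Bool :=
  pvRepCheck (PySem.Int.toStr number).toList [2, 3, 5, 7]

-- ===== PRECONDITION & SPEC =====
def Spec_checkvalidprt2 (number : Int) (out : Bool) : Prop := out = checkvalidprt2_alt number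
instance (number : Int) (out : Bool) : Decidable (Spec_checkvalidprt2 number out) := by unfold Spec_checkvalidprt2; infer_instance

-- ===== CLAIM (what is proved, stated in full; the proofs are below) =====
def Claim_equal_checkvalidprt2 : Prop := ∀ (number : Int), Dom_checkvalidprt2 number → Spec_checkvalidprt2 number (checkvalidprt2 number)

-- ===== LEMMAS AND PROOFS =====

lemma foldl_count (P : Nat → Bool) (l : List Nat) (g : Nat) :
    l.foldl (fun g i => if P i then g + 1 else g) g = g + l.countP P := by
  induction l generalizing g with
  | nil => simp
  | cons a t ih =>
    simp only [List.foldl_cons, List.countP_cons, ih]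
    by_cases h : P a = true <;> simp [h] <;> omega

lemma pvCount_eq_iff (P : Nat → Bool) (w : Nat) :
    pvCount P w = w ↔ ∀ i < w, P i = true := by
  have h := foldl_count P (List.range w) 0
  unfold pvCount
  rw [h, Nat.zero_add]
  constructor
  · intro hc i hi
    have : (List.range w).countP P = (List.range w).length := by simpa using hc
    exact List.countP_eq_length.mp this i (List.mem_range.mpr hi)
  · intro hall
    have : (List.range w).countP P = (List.range w).length :=
      List.countP_eq_length.mpr (fun a ha => hall a (List.mem_range.mp ha))
    simpa using this

lemma getD_flatten_replicate (t : List Char) (k m : Nat) (hm : m < k * t.length) :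
    ((List.replicate k t).flatten).getD m ' ' = t.getD (m % t.length) ' ' := by
  induction k generalizing m with
  | zero => simp at hm
  | succ k ih =>
    have hkl : (k + 1) * t.length = k * t.length + t.length := by ring
    have hm' : m < k * t.length + t.length := by omega
    simp only [List.replicate_succ, List.flatten_cons]
    by_cases h : m < t.length
    · rw [List.getD_append _ _ _ _ h, Nat.mod_eq_of_lt h]
    · have h' : t.length <= m := by omega
      rw [List.getD_append_right _ _ _ _ h']
      rw [ih (m - t.length) (by omega)]
      rw [Nat.mod_eq_sub_mod h']

lemma length_flatten_replicate (t : List Char) (k : Nat) :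
    ((List.replicate k t).flatten).length = k * t.length := by
  simp [List.length_flatten, Nat.mul_comm]

lemma ext_getD {L : Nat} (l₁ l₂ : List Char) (h₁ : l₁.length = L) (h₂ : l₂.length = L)
    (h : ∀ m < L, l₁.getD m ' ' = l₂.getD m ' ') : l₁ = l₂ := by
  apply List.ext_getElem (by omega)
  intro i hi₁ hi₂
  have := h i (by omega)
  rwa [List.getD_eq_getElem _ _ hi₁, List.getD_eq_getElem _ _ hi₂] at this

lemma getD_take (s : List Char) (w i : Nat) (hi : i < w) :
    (s.take w).getD i ' ' = s.getD i ' ' := by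
  by_cases h : i < s.length
  · rw [List.getD_eq_getElem _ _ (by simp; omega), List.getD_eq_getElem _ _ h]
    simp
  · rw [List.getD_eq_default _ _ (by simp; omega), List.getD_eq_default _ _ (by omega)]

-- B's condition characterised by indices modulo w
lemma rep_iff (s : List Char) (k w : Nat) (hn : s.length = k * w) :
    ((List.replicate k (s.take w)).flatten = s) ↔
      ∀ m < s.length, s.getD m ' ' = s.getD (m % w) ' ' := by
  by_cases hs : s.length = 0
  · have hnil : s = [] := List.eq_nil_of_length_eq_zero hs
    subst hnil
    simp
  · have hw0 : 0 < w := by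
      rcases Nat.eq_zero_or_pos w with h | h
      · subst h; rw [Nat.mul_zero] at hn; omega
      · exact h
    have hk0 : 0 < k := by
      rcases Nat.eq_zero_or_pos k with h | h
      · subst h; rw [Nat.zero_mul] at hn; omega
      · exact h
    have hwle : w ≤ s.length := by
      have h1 : 1 * w ≤ k * w := Nat.mul_le_mul_right w hk0
      omega
    have htl : (s.take w).length = w := by
      rw [List.length_take]; omega
    constructor
    · intro heq m hm
      have h1 : ((List.replicate k (s.take w)).flatten).getD m ' '
          = (s.take w).getD (m % w) ' ' := by
        rw [getD_flatten_replicate _ _ _ (by rw [htl]; omega), htl]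
      rw [heq] at h1
      rw [h1, getD_take _ _ _ (Nat.mod_lt _ hw0)]
    · intro hmod
      apply ext_getD _ _ (L := s.length) (by rw [length_flatten_replicate, htl]; omega) rfl
      intro m hm
      rw [getD_flatten_replicate _ _ _ (by rw [htl]; omega), htl,
        getD_take _ _ _ (Nat.mod_lt _ hw0)]
      exact (hmod m hm).symm

-- A's chained count condition, characterised the same way (both directions).
lemma chain_to_mod (s : List Char) (k w : Nat) (hn : s.length = k * w)
    (hchain : ∀ i < w, ∀ j < k, s.getD (i + j * w) ' ' = s.getD i ' ') :
    ∀ m < s.length, s.getD m ' ' = s.getD (m % w) ' ' := by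
  intro m hm
  have hw0 : 0 < w := by
    by_contra h
    have hw : w = 0 := by omega
    subst hw
    rw [Nat.mul_zero] at hn
    omega
  have hi : m % w < w := Nat.mod_lt _ hw0
  have hj : m / w < k := Nat.div_lt_iff_lt_mul hw0 |>.mpr (by omega)
  have hcm : w * (m / w) = (m / w) * w := Nat.mul_comm _ _
  have hdm : m % w + (m / w) * w = m := by
    have h0 := Nat.div_add_mod m w
    omega
  have hc := hchain (m % w) hi (m / w) hj
  rw [hdm] at hc
  exact hc

lemma mod_to_chain (s : List Char) (k w : Nat) (hn : s.length = k * w)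
    (hmod : ∀ m < s.length, s.getD m ' ' = s.getD (m % w) ' ') :
    ∀ i < w, ∀ j < k, s.getD (i + j * w) ' ' = s.getD i ' ' := by
  intro i hi j hj
  have hm : i + j * w < s.length := by
    have h1 : j + 1 ≤ k := hj
    have h2 : (j + 1) * w ≤ k * w := Nat.mul_le_mul_right w h1
    have h3 : (j + 1) * w = j * w + w := by ring
    omega
  have := hmod (i + j * w) hm
  rwa [Nat.add_mul_mod_self_right, Nat.mod_eq_of_lt hi] at this

lemma bool_eq_of_iff {a b : Bool} (h : a = true ↔ b = true) : a = b := by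
  cases a <;> cases b <;> simp_all

-- per-k equivalence of loop condition and repetition condition, k = 2, 3, 5, 7
lemma cond2 (s : List Char) (h : s.length % 2 = 0) :
    (pvCount (fun i => s.getD i ' ' == s.getD (i + s.length / 2) ' ') (s.length / 2)
        = s.length / 2)
      ↔ (List.replicate 2 (s.take (s.length / 2))).flatten = s := by
  set w := s.length / 2 with hw
  have hn : s.length = 2 * w := by omega
  rw [pvCount_eq_iff, rep_iff s 2 w hn]
  constructor
  · intro hc
    apply chain_to_mod s 2 w hn
    intro i hi j hj
    have e1 : s.getD i ' ' = s.getD (i + w) ' ' := by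
      have := hc i hi
      simpa [beq_iff_eq] using this
    interval_cases j
    · rw [Nat.zero_mul, Nat.add_zero]
    · rw [Nat.one_mul]; exact e1.symm
  · intro hm i hi
    have hch := mod_to_chain s 2 w hn hm i hi
    have g1 := hch 1 (by omega)
    rw [Nat.one_mul] at g1
    simp only [beq_iff_eq]
    exact g1.symm

lemma cond3 (s : List Char) (h : s.length % 3 = 0) :
    (pvCount (fun i =>
        (s.getD i ' ' == s.getD (i + s.length / 3) ' ') &&
        (s.getD (i + s.length / 3) ' ' == s.getD (i + 2 * (s.length / 3)) ' '))
        (s.length / 3) = s.length / 3)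
      ↔ (List.replicate 3 (s.take (s.length / 3))).flatten = s := by
  set w := s.length / 3 with hw
  have hn : s.length = 3 * w := by omega
  rw [pvCount_eq_iff, rep_iff s 3 w hn]
  constructor
  · intro hc
    apply chain_to_mod s 3 w hn
    intro i hi j hj
    have hci := hc i hi
    simp only [Bool.and_eq_true, beq_iff_eq] at hci
    obtain ⟨e1, e2⟩ := hci
    have f1 : s.getD (i + w) ' ' = s.getD i ' ' := e1.symm
    have f2 : s.getD (i + 2 * w) ' ' = s.getD i ' ' := e2.symm.trans f1
    interval_cases j
    · rw [Nat.zero_mul, Nat.add_zero]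
    · rw [Nat.one_mul]; exact f1
    · exact f2
  · intro hm i hi
    have hch := mod_to_chain s 3 w hn hm i hi
    have g1 := hch 1 (by omega)
    rw [Nat.one_mul] at g1
    have g2 := hch 2 (by omega)
    simp only [Bool.and_eq_true, beq_iff_eq]
    exact ⟨g1.symm, g1.trans g2.symm⟩

lemma cond5 (s : List Char) (h : s.length % 5 = 0) :
    (pvCount (fun i =>
        (s.getD i ' ' == s.getD (i + s.length / 5) ' ') &&
        (s.getD (i + s.length / 5) ' ' == s.getD (i + 2 * (s.length / 5)) ' ') &&
        (s.getD (i + 2 * (s.length / 5)) ' ' == s.getD (i + 3 * (s.length / 5)) ' ') &&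
        (s.getD (i + 3 * (s.length / 5)) ' ' == s.getD (i + 4 * (s.length / 5)) ' '))
        (s.length / 5) = s.length / 5)
      ↔ (List.replicate 5 (s.take (s.length / 5))).flatten = s := by
  set w := s.length / 5 with hw
  have hn : s.length = 5 * w := by omega
  rw [pvCount_eq_iff, rep_iff s 5 w hn]
  constructor
  · intro hc
    apply chain_to_mod s 5 w hn
    intro i hi j hj
    have hci := hc i hi
    simp only [Bool.and_eq_true, beq_iff_eq] at hci
    obtain ⟨⟨⟨e1, e2⟩, e3⟩, e4⟩ := hci
    have f1 : s.getD (i + w) ' ' = s.getD i ' ' := e1.symm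
    have f2 : s.getD (i + 2 * w) ' ' = s.getD i ' ' := e2.symm.trans f1
    have f3 : s.getD (i + 3 * w) ' ' = s.getD i ' ' := e3.symm.trans f2
    have f4 : s.getD (i + 4 * w) ' ' = s.getD i ' ' := e4.symm.trans f3
    interval_cases j
    · rw [Nat.zero_mul, Nat.add_zero]
    · rw [Nat.one_mul]; exact f1
    · exact f2
    · exact f3
    · exact f4
  · intro hm i hi
    have hch := mod_to_chain s 5 w hn hm i hi
    have g1 := hch 1 (by omega)
    rw [Nat.one_mul] at g1
    have g2 := hch 2 (by omega)
    have g3 := hch 3 (by omega)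
    have g4 := hch 4 (by omega)
    simp only [Bool.and_eq_true, beq_iff_eq]
    exact ⟨⟨⟨g1.symm, g1.trans g2.symm⟩, g2.trans g3.symm⟩, g3.trans g4.symm⟩

lemma cond7 (s : List Char) (h : s.length % 7 = 0) :
    (pvCount (fun i =>
        (s.getD i ' ' == s.getD (i + s.length / 7) ' ') &&
        (s.getD (i + s.length / 7) ' ' == s.getD (i + 2 * (s.length / 7)) ' ') &&
        (s.getD (i + 2 * (s.length / 7)) ' ' == s.getD (i + 3 * (s.length / 7)) ' ') &&
        (s.getD (i + 3 * (s.length / 7)) ' ' == s.getD (i + 4 * (s.length / 7)) ' ') &&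
        (s.getD (i + 4 * (s.length / 7)) ' ' == s.getD (i + 5 * (s.length / 7)) ' ') &&
        (s.getD (i + 5 * (s.length / 7)) ' ' == s.getD (i + 6 * (s.length / 7)) ' '))
        (s.length / 7) = s.length / 7)
      ↔ (List.replicate 7 (s.take (s.length / 7))).flatten = s := by
  set w := s.length / 7 with hw
  have hn : s.length = 7 * w := by omega
  rw [pvCount_eq_iff, rep_iff s 7 w hn]
  constructor
  · intro hc
    apply chain_to_mod s 7 w hn
    intro i hi j hj
    have hci := hc i hi
    simp only [Bool.and_eq_true, beq_iff_eq] at hci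
    obtain ⟨⟨⟨⟨⟨e1, e2⟩, e3⟩, e4⟩, e5⟩, e6⟩ := hci
    have f1 : s.getD (i + w) ' ' = s.getD i ' ' := e1.symm
    have f2 : s.getD (i + 2 * w) ' ' = s.getD i ' ' := e2.symm.trans f1
    have f3 : s.getD (i + 3 * w) ' ' = s.getD i ' ' := e3.symm.trans f2
    have f4 : s.getD (i + 4 * w) ' ' = s.getD i ' ' := e4.symm.trans f3
    have f5 : s.getD (i + 5 * w) ' ' = s.getD i ' ' := e5.symm.trans f4
    have f6 : s.getD (i + 6 * w) ' ' = s.getD i ' ' := e6.symm.trans f5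
    interval_cases j
    · rw [Nat.zero_mul, Nat.add_zero]
    · rw [Nat.one_mul]; exact f1
    · exact f2
    · exact f3
    · exact f4
    · exact f5
    · exact f6
  · intro hm i hi
    have hch := mod_to_chain s 7 w hn hm i hi
    have g1 := hch 1 (by omega)
    rw [Nat.one_mul] at g1
    have g2 := hch 2 (by omega)
    have g3 := hch 3 (by omega)
    have g4 := hch 4 (by omega)
    have g5 := hch 5 (by omega)
    have g6 := hch 6 (by omega)
    simp only [Bool.and_eq_true, beq_iff_eq]
    exact ⟨⟨⟨⟨⟨g1.symm, g1.trans g2.symm⟩, g2.trans g3.symm⟩, g3.trans g4.symm⟩,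
      g4.trans g5.symm⟩, g5.trans g6.symm⟩

-- Bool versions of the per-k equivalences, matching the branch conditions verbatim.
lemma condBool2 (s : List Char) :
    (s.length % 2 == 0 && pvCount (fun i => s.getD i ' ' == s.getD (i + s.length / 2) ' ') (s.length / 2) == s.length / 2)
      = (s.length % 2 == 0 && (List.replicate 2 (s.take (s.length / 2))).flatten == s) := by
  by_cases h : s.length % 2 = 0
  · apply bool_eq_of_iff
    simp only [Bool.and_eq_true, beq_iff_eq]
    exact ⟨fun ⟨h0, h1⟩ => ⟨h0, (cond2 s h).mp h1⟩, fun ⟨h0, h1⟩ => ⟨h0, (cond2 s h).mpr h1⟩⟩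
  · have hf : (s.length % 2 == 0) = false := by simpa using h
    rw [hf, Bool.false_and, Bool.false_and]

lemma condBool3 (s : List Char) :
    (s.length % 3 == 0 && pvCount (fun i =>
        (s.getD i ' ' == s.getD (i + s.length / 3) ' ') &&
        (s.getD (i + s.length / 3) ' ' == s.getD (i + 2 * (s.length / 3)) ' ')) (s.length / 3) == s.length / 3)
      = (s.length % 3 == 0 && (List.replicate 3 (s.take (s.length / 3))).flatten == s) := by
  by_cases h : s.length % 3 = 0
  · apply bool_eq_of_iff
    simp only [Bool.and_eq_true, beq_iff_eq]
    exact ⟨fun ⟨h0, h1⟩ => ⟨h0, (cond3 s h).mp h1⟩, fun ⟨h0, h1⟩ => ⟨h0, (cond3 s h).mpr h1⟩⟩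
  · have hf : (s.length % 3 == 0) = false := by simpa using h
    rw [hf, Bool.false_and, Bool.false_and]

lemma condBool5 (s : List Char) :
    (s.length % 5 == 0 && pvCount (fun i =>
        (s.getD i ' ' == s.getD (i + s.length / 5) ' ') &&
        (s.getD (i + s.length / 5) ' ' == s.getD (i + 2 * (s.length / 5)) ' ') &&
        (s.getD (i + 2 * (s.length / 5)) ' ' == s.getD (i + 3 * (s.length / 5)) ' ') &&
        (s.getD (i + 3 * (s.length / 5)) ' ' == s.getD (i + 4 * (s.length / 5)) ' ')) (s.length / 5) == s.length / 5)
      = (s.length % 5 == 0 && (List.replicate 5 (s.take (s.length / 5))).flatten == s) := by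
  by_cases h : s.length % 5 = 0
  · apply bool_eq_of_iff
    simp only [Bool.and_eq_true, beq_iff_eq]
    exact ⟨fun ⟨h0, h1⟩ => ⟨h0, (cond5 s h).mp h1⟩, fun ⟨h0, h1⟩ => ⟨h0, (cond5 s h).mpr h1⟩⟩
  · have hf : (s.length % 5 == 0) = false := by simpa using h
    rw [hf, Bool.false_and, Bool.false_and]

lemma condBool7 (s : List Char) :
    (s.length % 7 == 0 && pvCount (fun i =>
        (s.getD i ' ' == s.getD (i + s.length / 7) ' ') &&
        (s.getD (i + s.length / 7) ' ' == s.getD (i + 2 * (s.length / 7)) ' ') &&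
        (s.getD (i + 2 * (s.length / 7)) ' ' == s.getD (i + 3 * (s.length / 7)) ' ') &&
        (s.getD (i + 3 * (s.length / 7)) ' ' == s.getD (i + 4 * (s.length / 7)) ' ') &&
        (s.getD (i + 4 * (s.length / 7)) ' ' == s.getD (i + 5 * (s.length / 7)) ' ') &&
        (s.getD (i + 5 * (s.length / 7)) ' ' == s.getD (i + 6 * (s.length / 7)) ' ')) (s.length / 7) == s.length / 7)
      = (s.length % 7 == 0 && (List.replicate 7 (s.take (s.length / 7))).flatten == s) := by
  by_cases h : s.length % 7 = 0
  · apply bool_eq_of_iff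
    simp only [Bool.and_eq_true, beq_iff_eq]
    exact ⟨fun ⟨h0, h1⟩ => ⟨h0, (cond7 s h).mp h1⟩, fun ⟨h0, h1⟩ => ⟨h0, (cond7 s h).mpr h1⟩⟩
  · have hf : (s.length % 7 == 0) = false := by simpa using h
    rw [hf, Bool.false_and, Bool.false_and]

lemma pvCheckA_eq (s : List Char) : pvCheckA s = pvRepCheck s [2, 3, 5, 7] := by
  unfold pvCheckA
  simp only [pvRepCheck]
  rw [condBool2 s, condBool3 s, condBool5 s, condBool7 s]

-- ===== VERDICT (by name: the statement is the Claim_ definition above) =====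
theorem checkvalidprt2_spec : Claim_equal_checkvalidprt2 := by
  intro number _
  unfold Spec_checkvalidprt2 checkvalidprt2 checkvalidprt2_alt
  exact pvCheckA_eq _
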